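-- pv_equiv track=rewrite | github.com/AcubeSAT/gnuradio-blocks | prototypes/bch.py | calc_syndromes_63_56
-- ===== SOURCE A (Python) =====
-- import math
--
-- generator_polynomial = int("11000101", 2)
--
-- primitive_elements_bch_63_54 = [1, 2, 4, 8, 16, 32, 64, 69, 79, 91, 115, 35, 70, 73, 87, 107,
--                                 19, 38, 76, 93, 127, 59, 118, 41, 82, 97, 7, 14, 28, 56, 112,
--                                 37, 74, 81, 103, 11, 22, 44, 88, 117, 47, 94, 121, 55, 110, 25,
--                                 50, 100, 13, 26, 52, 104, 21, 42, 84, 109, 31, 62, 124, 61, 122,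
--                                 49, 98, 1]
--
-- def binary_polynomial_division(dividend, divisor):
--     """
--     Performs polynomial division in GF(2) - essentially long binary division.
--     In this context, a and b are integers the binary representation of which
--     indicates their coefficients. The remainder is saved in the dividend variable in the
--     end of the process.
--     """
--     # TODO? We could unroll and get rid of the extra conditional checks if we know the generator beforehand.
--     if divisor == 0:
--         return
--     if dividend == 0:
--         return 0, divisor
--
--     # TODO: Too expensive for no reason. Why log when you can shift??
--     dividend_degree = math.floor(math.log(dividend, 2)) + 1
--     divisor_degree = math.floor(math.log(divisor, 2)) + 1
--     bit_position = 0
--     quotient = 0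
--     while dividend >= divisor:
--         quotient <<= 1
--         if dividend >> (dividend_degree - bit_position - 1) & 1 == 1:
--             dividend ^= divisor << (dividend_degree - divisor_degree - bit_position)
--             quotient += 1
--         bit_position += 1
--     deg_r = math.floor(math.log(dividend, 2)) + 1
--
--     return dividend, quotient << (deg_r - 1)
--
-- def calc_syndromes_63_56(received_message):
--     """
--     Calculate syndromes given the received message r for BCH(63, 56)
--     """
--     syndrome1 = syndrome2 = 0
--     index = 0
--     while received_message:
--         current_bit = received_message & 1
--         if current_bit == 1:
--             syndrome1 ^= primitive_elements_bch_63_54[index % 63]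
--             syndrome2 ^= primitive_elements_bch_63_54[(2 * index) % 63]
--         index += 1
--         received_message >>= 1
--     syndrome1 = binary_polynomial_division(syndrome1, generator_polynomial)[0]
--     syndrome2 = binary_polynomial_division(syndrome2, generator_polynomial)[0]
--     return [syndrome1, syndrome2]
-- ===== SOURCE B (Python) =====
-- def calc_syndromes_63_56(received_message):
--     """
--     Calculate syndromes given the received message r for BCH(63, 56),
--     by Horner evaluation at alpha and alpha^2 in GF(2^7) (x^7+x^6+x^2+1 -> 197),
--     instead of XOR-ing precomputed powers from a table.
--     """
--     def mul_alpha(y):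
--         y <<= 1
--         return y ^ 197 if y & 128 else y
--     s1 = s2 = 0
--     for i in range(received_message.bit_length() - 1, -1, -1):
--         bit = (received_message >> i) & 1
--         s1 = mul_alpha(s1) ^ bit
--         s2 = mul_alpha(mul_alpha(s2)) ^ bit
--     return [s1, s2]
-- ===== Notes on version B (the rewrite author's own statement) =====
-- stated objective: alternative
-- what changed: Replaces the precomputed power table and per-set-bit XOR of table entries by Horner evaluation of the received polynomial at alpha and alpha^2 in GF(2^7) (MSB-first, one shift-and-reduce per bit), dropping the table and the trailing polynomial-division no-op.
import Mathlib
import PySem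

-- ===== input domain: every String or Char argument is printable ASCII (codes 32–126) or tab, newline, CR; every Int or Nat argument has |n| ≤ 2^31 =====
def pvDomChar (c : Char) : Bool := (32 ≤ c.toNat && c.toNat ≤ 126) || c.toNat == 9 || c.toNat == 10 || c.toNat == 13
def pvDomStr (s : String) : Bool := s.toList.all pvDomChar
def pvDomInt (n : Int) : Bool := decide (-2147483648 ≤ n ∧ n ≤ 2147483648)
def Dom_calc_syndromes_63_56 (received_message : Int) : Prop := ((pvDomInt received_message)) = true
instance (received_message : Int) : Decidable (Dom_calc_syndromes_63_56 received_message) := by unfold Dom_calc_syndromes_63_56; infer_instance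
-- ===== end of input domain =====

-- B replaces the per-bit table lookups by Horner evaluation at alpha and alpha^2 in GF(2^7)
-- (objective: alternative algorithm, no table; return-value equivalence proved on received_message ≥ 0).

-- ===== PORT A =====
def generator_polynomial : Int := 197  -- int("11000101", 2)

def primitive_elements_bch_63_54 : List Int :=
  [1, 2, 4, 8, 16, 32, 64, 69, 79, 91, 115, 35, 70, 73, 87, 107,
   19, 38, 76, 93, 127, 59, 118, 41, 82, 97, 7, 14, 28, 56, 112,
   37, 74, 81, 103, 11, 22, 44, 88, 117, 47, 94, 121, 55, 110, 25,
   50, 100, 13, 26, 52, 104, 21, 42, 84, 109, 31, 62, 124, 61, 122,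
   49, 98, 1]

-- the 'while dividend >= divisor' loop of binary_polynomial_division; fuel only makes it
-- total (for the dividends A produces the guard fails at once, so fuel is never exhausted).
-- Shift amounts are taken via .toNat: exact wherever Python does not raise ValueError.
def bpdLoop (fuel : Nat) (dividend divisor dividend_degree divisor_degree : Int)
    (bit_position quotient : Int) : Int × Int :=
  match fuel with
  | 0 => (dividend, quotient)
  | fuel + 1 =>
    if divisor ≤ dividend then
      let quotient := quotient <<< 1
      let (dividend, quotient) :=
        if PySem.Int.band (dividend >>> (dividend_degree - bit_position - 1).toNat) 1 = 1 then
          (PySem.Int.bxor dividend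
            (divisor <<< (dividend_degree - divisor_degree - bit_position).toNat), quotient + 1)
        else (dividend, quotient)
      bpdLoop fuel dividend divisor dividend_degree divisor_degree (bit_position + 1) quotient
    else (dividend, quotient)

-- binary_polynomial_division; returns none exactly where Python returns None (divisor == 0)
-- or raises (math.log of a non-positive number).  math.floor(math.log(x, 2)) + 1 is ported as
-- PySem.Int.bitLength x — exact for the magnitudes |x| ≤ 2^31 reached under Dom_.
def binary_polynomial_division (dividend divisor : Int) : Option (Int × Int) :=
  if divisor = 0 then none
  else if dividend = 0 then some (0, divisor)
  else if dividend < 0 then none  -- math.log raises ValueError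
  else
    let dividend_degree : Int := (PySem.Int.bitLength dividend : Int)
    let divisor_degree : Int := (PySem.Int.bitLength divisor : Int)
    let (dividend', quotient) :=
      bpdLoop (dividend.natAbs + 1) dividend divisor dividend_degree divisor_degree 0 0
    if dividend' ≤ 0 then none  -- math.log raises ValueError
    else
      let deg_r : Int := (PySem.Int.bitLength dividend' : Int)
      some (dividend', quotient <<< (deg_r - 1).toNat)

-- the 'while received_message' loop of A, run on received_message.toNat (A is only claimed on
-- received_message ≥ 0, where m & 1 / m >>= 1 on Int and on Nat coincide; for negative input
-- Python never terminates).  list[index % 63]: the reduced index is always in range of the table.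
def calcLoopA (m : Nat) (syndrome1 syndrome2 : Int) (index : Nat) : Int × Int :=
  if m = 0 then (syndrome1, syndrome2)
  else
    let current_bit := m % 2
    let (syndrome1, syndrome2) :=
      if current_bit = 1 then
        (PySem.Int.bxor syndrome1 (primitive_elements_bch_63_54.getD (index % 63) 0),
         PySem.Int.bxor syndrome2 (primitive_elements_bch_63_54.getD ((2 * index) % 63) 0))
      else (syndrome1, syndrome2)
    calcLoopA (m / 2) syndrome1 syndrome2 (index + 1)

def calc_syndromes_63_56 (received_message : Int) : List Int :=
  let (syndrome1, syndrome2) := calcLoopA received_message.toNat 0 0 0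
  -- generator_polynomial = 197 ≠ 0, so the division never returns none; getD is a totality guard
  let syndrome1 := ((binary_polynomial_division syndrome1 generator_polynomial).getD (0, 0)).1
  let syndrome2 := ((binary_polynomial_division syndrome2 generator_polynomial).getD (0, 0)).1
  [syndrome1, syndrome2]

-- ===== PORT B =====
def mul_alpha (y : Int) : Int :=
  let y := y <<< 1
  if PySem.Int.band y 128 ≠ 0 then PySem.Int.bxor y 197 else y

-- range(bit_length - 1, -1, -1) = (List.range bit_length).reverse
def calc_syndromes_63_56_alt (received_message : Int) : List Int :=
  let p :=
    (List.range (PySem.Int.bitLength received_message)).reverse.foldl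
      (fun (s : Int × Int) (i : Nat) =>
        let bit := PySem.Int.band (received_message >>> i) 1
        (PySem.Int.bxor (mul_alpha s.1) bit,
         PySem.Int.bxor (mul_alpha (mul_alpha s.2)) bit))
      (0, 0)
  [p.1, p.2]

-- ===== PRECONDITION & SPEC =====
-- Pre_ excludes negative inputs: there A's 'while received_message' loop never terminates
-- (right-shifting a negative Python int never reaches 0), so A returns on no excluded input.
def Pre_calc_syndromes_63_56 (received_message : Int) : Prop := 0 ≤ received_message
instance (received_message : Int) : Decidable (Pre_calc_syndromes_63_56 received_message) := by
  unfold Pre_calc_syndromes_63_56; infer_instance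

def pvWitness_calc_syndromes_63_56 : Int := 37

def Spec_calc_syndromes_63_56 (received_message : Int) (out : List Int) : Prop := out = calc_syndromes_63_56_alt received_message
instance (received_message : Int) (out : List Int) : Decidable (Spec_calc_syndromes_63_56 received_message out) := by unfold Spec_calc_syndromes_63_56; infer_instance

-- ===== CLAIM (what is proved, stated in full; the proofs are below) =====
def Claim_equal_calc_syndromes_63_56 : Prop := ∀ (received_message : Int), Dom_calc_syndromes_63_56 received_message → Pre_calc_syndromes_63_56 received_message → Spec_calc_syndromes_63_56 received_message (calc_syndromes_63_56 received_message)

-- ===== LEMMAS AND PROOFS =====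

-- Nat-level model: the first 63 table entries, as Nat
def primN : List Nat :=
  [1, 2, 4, 8, 16, 32, 64, 69, 79, 91, 115, 35, 70, 73, 87, 107,
   19, 38, 76, 93, 127, 59, 118, 41, 82, 97, 7, 14, 28, 56, 112,
   37, 74, 81, 103, 11, 22, 44, 88, 117, 47, 94, 121, 55, 110, 25,
   50, 100, 13, 26, 52, 104, 21, 42, 84, 109, 31, 62, 124, 61, 122,
   49, 98]

def Pf (j : Fin 63) : Nat := primN.getD j.val 0

-- multiplication by alpha in GF(2^7), on Nat
def stepN (u : Nat) : Nat := if 128 ≤ 2 * u then (2 * u) ^^^ 197 else 2 * u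

-- syndrome of the low k bits of m, start index idx, table stride c
def Vg (c : Nat) : Nat → Nat → Nat → Nat
  | 0, _, _ => 0
  | k + 1, m, idx =>
    (if m % 2 = 1 then Pf ⟨c * idx % 63, Nat.mod_lt _ (by norm_num)⟩ else 0) ^^^ Vg c k (m / 2) (idx + 1)

theorem stepN_lt : ∀ u : Fin 128, stepN u.val < 128 := by decide

set_option maxRecDepth 8192 in
theorem stepN_xor : ∀ a b : Fin 128, stepN (a.val ^^^ b.val) = stepN a.val ^^^ stepN b.val := by decide

theorem stepN_Pf : ∀ j : Fin 63, stepN (Pf j) = Pf (j + 1) := by decide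

theorem Pf_lt : ∀ j : Fin 63, Pf j < 128 := by decide

theorem mul_alpha_cast : ∀ u : Fin 128, mul_alpha (u.val : Int) = ((stepN u.val : Nat) : Int) := by
  decide

theorem iter_xor (k : Nat) {a b : Nat} (ha : a < 128) (hb : b < 128) :
    stepN^[k] (a ^^^ b) = stepN^[k] a ^^^ stepN^[k] b := by
  induction k generalizing a b with
  | zero => simp
  | succ k ih =>
    rw [Function.iterate_succ_apply, Function.iterate_succ_apply, Function.iterate_succ_apply,
      stepN_xor ⟨a, ha⟩ ⟨b, hb⟩]
    exact ih (stepN_lt ⟨a, ha⟩) (stepN_lt ⟨b, hb⟩)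

theorem iter_zero (k : Nat) : stepN^[k] 0 = 0 :=
  Function.iterate_fixed (by decide) k

theorem iter_one (k : Nat) : stepN^[k] 1 = Pf ⟨k % 63, Nat.mod_lt _ (by norm_num)⟩ := by
  induction k with
  | zero => decide
  | succ k ih =>
    rw [Function.iterate_succ_apply', ih, stepN_Pf]
    congr 1
    apply Fin.ext
    simp [Fin.add_def, Nat.add_mod]

theorem Vg_zero (c k idx : Nat) : Vg c k 0 idx = 0 := by
  induction k generalizing idx with
  | zero => rfl
  | succ k ih => simp [Vg, ih]

theorem Vg_lt (c k : Nat) : ∀ m idx, Vg c k m idx < 128 := by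
  induction k with
  | zero => intro m idx; simp [Vg]
  | succ k ih =>
    intro m idx
    have h1 : (if m % 2 = 1 then Pf ⟨c * idx % 63, Nat.mod_lt _ (by norm_num)⟩ else 0) < 128 := by
      split
      · exact Pf_lt _
      · norm_num
    exact Nat.xor_lt_two_pow (n := 7) h1 (ih (m / 2) (idx + 1))

-- top-bit decomposition of Vg
theorem Vg_top (c : Nat) : ∀ k m idx,
    Vg c (k + 1) m idx =
      Vg c k m idx ^^^
        (if m / 2 ^ k % 2 = 1 then Pf ⟨c * (idx + k) % 63, Nat.mod_lt _ (by norm_num)⟩ else 0) := by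
  intro k
  induction k with
  | zero => intro m idx; simp [Vg]
  | succ k ih =>
    intro m idx
    show (if m % 2 = 1 then _ else 0) ^^^ Vg c (k + 1) (m / 2) (idx + 1) = _
    rw [ih (m / 2) (idx + 1), ← Nat.xor_assoc]
    have h1 : m / 2 / 2 ^ k = m / 2 ^ (k + 1) := by
      rw [Nat.div_div_eq_div_mul, pow_succ, mul_comm]
    have h2 : idx + 1 + k = idx + (k + 1) := by omega
    rw [h1, h2]
    rfl

theorem prim_cast : ∀ j : Fin 63,
    primitive_elements_bch_63_54.getD j.val 0 = ((Pf j : Nat) : Int) := by decide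

-- A's loop computes the Vg syndromes (cast to Int)
theorem calcLoopA_eq : ∀ K m (u1 u2 : Nat) idx, m < 2 ^ K →
    calcLoopA m (u1 : Int) (u2 : Int) idx =
      (((u1 ^^^ Vg 1 K m idx : Nat) : Int), ((u2 ^^^ Vg 2 K m idx : Nat) : Int)) := by
  intro K
  induction K with
  | zero =>
    intro m u1 u2 idx h
    interval_cases m
    simp [calcLoopA, Vg]
  | succ K ih =>
    intro m u1 u2 idx h
    by_cases hm : m = 0
    · subst hm; simp [calcLoopA, Vg_zero]
    · have hdiv : m / 2 < 2 ^ K := by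
        have h2 : 2 ^ (K + 1) = 2 * 2 ^ K := by ring
        omega
      rw [calcLoopA, if_neg hm]
      have e1 := prim_cast ⟨idx % 63, Nat.mod_lt _ (by norm_num)⟩
      have e2 := prim_cast ⟨2 * idx % 63, Nat.mod_lt _ (by norm_num)⟩
      by_cases hb : m % 2 = 1
      · simp only [hb, if_true, e1, e2, PySem.Int.bxor_natCast]
        rw [ih (m / 2) _ _ (idx + 1) hdiv]
        show _ = ((((u1 ^^^ Vg 1 (K + 1) m idx : Nat)) : Int), (((u2 ^^^ Vg 2 (K + 1) m idx : Nat)) : Int))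
        simp only [Vg, hb, Pf]
        rw [← Nat.xor_assoc, ← Nat.xor_assoc]
        simp
      · simp only [hb, if_false]
        rw [ih (m / 2) _ _ (idx + 1) hdiv]
        show _ = ((((u1 ^^^ Vg 1 (K + 1) m idx : Nat)) : Int), (((u2 ^^^ Vg 2 (K + 1) m idx : Nat)) : Int))
        simp [Vg, hb]

-- B's fold: Horner accumulation over the top k bits
theorem foldB_eq (N : Nat) : ∀ k (u1 u2 : Nat), u1 < 128 → u2 < 128 →
    ((List.range k).reverse.foldl
      (fun (s : Int × Int) (i : Nat) =>
        let bit := PySem.Int.band (((N : Int)) >>> i) 1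
        (PySem.Int.bxor (mul_alpha s.1) bit,
         PySem.Int.bxor (mul_alpha (mul_alpha s.2)) bit))
      ((u1 : Int), (u2 : Int))) =
      (((stepN^[k] u1 ^^^ Vg 1 k N 0 : Nat) : Int), ((stepN^[2 * k] u2 ^^^ Vg 2 k N 0 : Nat) : Int)) := by
  intro k
  induction k with
  | zero => intro u1 u2 h1 h2; simp [Vg]
  | succ k ih =>
    intro u1 u2 h1 h2
    rw [List.range_succ, List.reverse_append]
    simp only [List.reverse_singleton, List.singleton_append, List.foldl_cons]
    have hshift : ((N : Int) >>> k) = ((N >>> k : Nat) : Int) := by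
      simp [Int.natCast_shiftRight]
    have hbit : PySem.Int.band ((N : Int) >>> k) 1 = ((N / 2 ^ k % 2 : Nat) : Int) := by
      rw [hshift, show (1 : Int) = ((1 : Nat) : Int) from rfl, PySem.Int.band_natCast]
      rw [Nat.and_one_is_mod, Nat.shiftRight_eq_div_pow]
    set b : Nat := N / 2 ^ k % 2 with hbdef
    have hblt : b < 128 := by have := Nat.mod_lt (N / 2 ^ k) (y := 2) (by norm_num); omega
    have hs1 : stepN u1 < 128 := stepN_lt ⟨u1, h1⟩
    have hs2 : stepN u2 < 128 := stepN_lt ⟨u2, h2⟩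
    have hss2 : stepN (stepN u2) < 128 := stepN_lt ⟨_, hs2⟩
    have hma1 : mul_alpha (u1 : Int) = ((stepN u1 : Nat) : Int) := mul_alpha_cast ⟨u1, h1⟩
    have hma2 : mul_alpha (mul_alpha (u2 : Int)) = ((stepN (stepN u2) : Nat) : Int) := by
      rw [mul_alpha_cast ⟨u2, h2⟩]; exact mul_alpha_cast ⟨_, hs2⟩
    simp only [hbit, hma1, hma2, PySem.Int.bxor_natCast]
    rw [ih (stepN u1 ^^^ b) (stepN (stepN u2) ^^^ b)
      (Nat.xor_lt_two_pow (n := 7) hs1 hblt) (Nat.xor_lt_two_pow (n := 7) hss2 hblt)]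
    -- Nat-side: push the freshly consumed top bit into Vg
    have hiterb : ∀ j : Nat, stepN^[j] b =
        (if b = 1 then Pf ⟨j % 63, Nat.mod_lt _ (by norm_num)⟩ else 0) := by
      intro j
      by_cases hb1 : b = 1
      · rw [hb1, if_pos rfl, iter_one]
      · have hb0 : b = 0 := by omega
        rw [hb0]
        simp [iter_zero]
    congr 1
    · rw [iter_xor k hs1 hblt, ← Function.iterate_succ_apply, Vg_top 1 k N 0, hiterb k]
      have : (1 * (0 + k)) % 63 = k % 63 := by omega
      rw [Nat.xor_assoc]
      congr 2
      · rw [Nat.xor_comm]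
        congr 2
        simp
    · rw [iter_xor (2 * k) hss2 hblt, ← Function.iterate_succ_apply,
        ← Function.iterate_succ_apply, Vg_top 2 k N 0, hiterb (2 * k)]
      have hn : 2 * (k + 1) = 2 * k + 1 + 1 := by omega
      rw [hn, Nat.xor_assoc]
      congr 2
      · rw [Nat.xor_comm]
        congr 2
        simp

theorem bpdLoop_small (u : Nat) (hu : u < 128) (dd dvd : Int) :
    bpdLoop (u + 1) (u : Int) generator_polynomial dd dvd 0 0 = ((u : Int), 0) := by
  rw [bpdLoop, if_neg (by norm_num [generator_polynomial]; omega)]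

theorem bpd_small (u : Nat) (hu : u < 128) :
    ((binary_polynomial_division (u : Int) generator_polynomial).getD (0, 0)).1 = (u : Int) := by
  by_cases hu0 : u = 0
  · subst hu0; decide
  · have hne : ((u : Int)) ≠ 0 := by exact_mod_cast hu0
    have hnn : ¬ ((u : Int)) < 0 := not_lt.mpr (Int.natCast_nonneg u)
    rw [binary_polynomial_division, if_neg (by norm_num [generator_polynomial]), if_neg hne,
      if_neg hnn]
    have habs : (↑u : Int).natAbs = u := by simp
    simp only [habs, bpdLoop_small u hu]
    rw [if_neg (by omega)]
    simp

-- ===== VERDICT (by name: the statement is the Claim_ definition above) =====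
theorem calc_syndromes_63_56_spec : Claim_equal_calc_syndromes_63_56 := by
  intro m hdom hpre
  have hm : ((m.toNat : Nat) : Int) = m := Int.toNat_of_nonneg hpre
  set N : Nat := m.toNat with hN
  unfold Spec_calc_syndromes_63_56
  rw [← hm]
  set K : Nat := PySem.Int.bitLength ((N : Int)) with hK
  have hlt : N < 2 ^ K := by
    have := PySem.Int.lt_two_pow_bitLength ((N : Int))
    simpa using this
  have hz : ((0 : Nat) : Int) = (0 : Int) := rfl
  -- A's side
  have hA : calc_syndromes_63_56 ((N : Int)) =
      [((Vg 1 K N 0 : Nat) : Int), ((Vg 2 K N 0 : Nat) : Int)] := by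
    rw [calc_syndromes_63_56]
    rw [show ((N : Int)).toNat = N by simp, ← hz, calcLoopA_eq K N 0 0 0 hlt]
    simp only [Nat.zero_xor]
    simp only [Nat.cast_zero]
    rw [bpd_small _ (Vg_lt 1 K N 0), bpd_small _ (Vg_lt 2 K N 0)]
  -- B's side
  have hB : calc_syndromes_63_56_alt ((N : Int)) =
      [((Vg 1 K N 0 : Nat) : Int), ((Vg 2 K N 0 : Nat) : Int)] := by
    rw [calc_syndromes_63_56_alt]
    rw [show ((0, 0) : Int × Int) = (((0 : Nat) : Int), ((0 : Nat) : Int)) from rfl]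
    rw [foldB_eq N K 0 0 (by norm_num) (by norm_num)]
    simp [iter_zero]
  rw [hA, hB]
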